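-- pv_equiv track=rewrite | github.com/q11N9/CTF_Writeups | Năm 2/Kì 2 đợt 2/ThuatToanATTT/.vscode/Phần 1/bai26.py | strongNumber
-- ===== SOURCE A (Python) =====
-- import math
--
-- def prime(n):
--     sieve = [True] * (n + 1)
--     sieve[0] = sieve[1] = 0
--     res = []
--     for i in range (2, n +  1):
--         if sieve[i] == True:
--             res.append(i)
--             j = 2
--             while i * j <= n:
--                 sieve[i * j] = False
--                 j += 1
--     return res
--
-- def strongNumber(N):
--     if N < 4:
--         return []
--     litmit = math.ceil(math.sqrt(N))
--     primes = prime(litmit)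
--     strongNumbers = [False] * N
--     for i in primes:
--         j = 1
--         while i**2 * j < N:
--             strongNumbers[i**2 * j] = True
--             j += 1
--     res = []
--     for i in range(0, len(strongNumbers)):
--         if strongNumbers[i] == True:
--             res.append(i)
--     return res
-- ===== SOURCE B (Python) =====
-- def strongNumber(N):
--     if N < 4:
--         return []
--     marked = [False] * N
--     i = 2
--     while i * i < N:
--         m = i * i
--         while m < N:
--             marked[m] = True
--             m += i * i
--         i += 1
--     return [k for k in range(N) if marked[k]]
-- ===== Notes on version B (the rewrite author's own statement) =====
-- stated objective: simpler
-- what changed: B removes A's sieve-of-Eratosthenes prime-generation step entirely and instead marks multiples of i*i for every integer i (from two up, while i*i is below N), which marks the same set because a number has a square-of-prime divisor iff it has a square divisor i*i for some i of at least two (via the least prime factor).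
import Mathlib
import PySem

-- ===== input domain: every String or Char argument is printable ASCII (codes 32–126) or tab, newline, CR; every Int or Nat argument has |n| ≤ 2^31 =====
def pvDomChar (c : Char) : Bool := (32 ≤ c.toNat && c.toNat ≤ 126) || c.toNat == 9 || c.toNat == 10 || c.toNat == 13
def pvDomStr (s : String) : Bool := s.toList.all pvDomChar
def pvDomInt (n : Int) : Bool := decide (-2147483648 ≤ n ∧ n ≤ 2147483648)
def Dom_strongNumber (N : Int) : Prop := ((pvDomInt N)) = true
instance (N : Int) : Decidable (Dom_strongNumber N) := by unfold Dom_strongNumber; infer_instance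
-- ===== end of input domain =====

-- B drops A's prime sieve: it marks multiples of i*i for every i ≥ 2 (same set, since any
-- square-of-prime divisor gives a square divisor and vice versa via the least prime factor);
-- objective: simpler (no speed claim).

-- ===== PORT A =====

-- inner while of prime(): while i * j <= n: sieve[i*j] = False; j += 1
-- (the '2 ≤ i' conjunct is a termination guard only; every call site has i ≥ 2)
def crossOff (s : List Bool) (i j n : Nat) : List Bool :=
  if h : 2 ≤ i ∧ i * j ≤ n then crossOff (s.set (i * j) false) i (j + 1) n else s
termination_by n + 1 - i * j
decreasing_by
  rw [Nat.mul_succ]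
  have h1 := h.1; have h2 := h.2
  omega

def sieveStep (n : Nat) (st : List Bool × List Nat) (i : Nat) : List Bool × List Nat :=
  if st.1.getD i false then (crossOff st.1 i 2 n, st.2 ++ [i]) else st

-- prime(n): sieve of Eratosthenes, res collects i with sieve[i] still True
def primeA (n : Nat) : List Nat :=
  ((List.range' 2 (n - 1)).foldl (sieveStep n)
    (((List.replicate (n + 1) true).set 0 false).set 1 false, ([] : List Nat))).2

-- math.ceil(math.sqrt(n)); exact for 0 ≤ n ≤ 2^31 where the double sqrt never crosses an integer
def litmitOf (n : Nat) : Nat := if n.sqrt * n.sqrt = n then n.sqrt else n.sqrt + 1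

-- inner while of strongNumber: while i**2 * j < N: strongNumbers[i**2*j] = True; j += 1
-- ('2 ≤ i' is a termination guard only; primes elements are ≥ 2)
def markMul (arr : List Bool) (i j n : Nat) : List Bool :=
  if h : 2 ≤ i ∧ i * i * j < n then markMul (arr.set (i * i * j) true) i (j + 1) n else arr
termination_by n - i * i * j
decreasing_by
  rw [Nat.mul_succ]
  have h1 := h.1; have h2 := h.2
  have h3 : 2 * 2 ≤ i * i := Nat.mul_le_mul h1 h1
  omega

def strongNumber (N : Int) : List Int :=
  if N < 4 then [] else
    let n := N.toNat
    let litmit := litmitOf n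
    let primes := primeA litmit
    let arr := primes.foldl (fun a p => markMul a p 1 n) (List.replicate n false)
    (List.range arr.length).foldl
      (fun res i => if arr.getD i false then res ++ [Int.ofNat i] else res) []

-- ===== PORT B =====

-- inner while: while m < N: marked[m] = True; m += i*i  ('1 ≤ step' is a termination guard only)
def markFrom (arr : List Bool) (m step n : Nat) : List Bool :=
  if h : 1 ≤ step ∧ m < n then markFrom (arr.set m true) (m + step) step n else arr
termination_by n - m
decreasing_by have h1 := h.1; have h2 := h.2; omega

-- outer while: i = 2; while i*i < N: ...; i += 1  ('2 ≤ i' is a termination guard only)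
def outerB (arr : List Bool) (i n : Nat) : List Bool :=
  if h : 2 ≤ i ∧ i * i < n then outerB (markFrom arr (i * i) (i * i) n) (i + 1) n else arr
termination_by n - i
decreasing_by
  have h1 := h.1; have h2 := h.2
  have h3 : i ≤ i * i := Nat.le_mul_of_pos_left i (by omega)
  omega

def strongNumber_alt (N : Int) : List Int :=
  if N < 4 then [] else
    let n := N.toNat
    let marked := outerB (List.replicate n false) 2 n
    ((List.range n).filter (fun k => marked.getD k false)).map Int.ofNat

-- ===== PRECONDITION & SPEC =====
def Spec_strongNumber (N : Int) (out : List Int) : Prop := out = strongNumber_alt N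
instance (N : Int) (out : List Int) : Decidable (Spec_strongNumber N out) := by unfold Spec_strongNumber; infer_instance

-- ===== CLAIM (what is proved, stated in full; the proofs are below) =====
def Claim_equal_strongNumber : Prop := ∀ (N : Int), Dom_strongNumber N → Spec_strongNumber N (strongNumber N)

-- ===== LEMMAS AND PROOFS =====

theorem crossOff_length (s : List Bool) (i j n : Nat) : (crossOff s i j n).length = s.length := by
  rw [crossOff]
  split
  · rw [crossOff_length]; simp
  · rfl
termination_by n + 1 - i * j
decreasing_by rw [Nat.mul_succ]; rename_i hc; obtain ⟨hc1, hc2⟩ := hc; omega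

theorem crossOff_getD_prime (s : List Bool) (i j n m : Nat) (hm : Nat.Prime m) (hj : 2 ≤ j) :
    (crossOff s i j n).getD m false = s.getD m false := by
  rw [crossOff]
  split
  · rename_i h
    rw [crossOff_getD_prime _ _ _ _ _ hm (by omega)]
    have hne : i * j ≠ m := by
      intro he
      rcases (Nat.Prime.eq_one_or_self_of_dvd hm i ⟨j, he.symm⟩) with h1 | h1
      · have := h.1; omega
      · subst h1
        have h2 : i * 2 ≤ i * j := Nat.mul_le_mul_left i hj
        have := hm.two_le
        omega
    simp [List.getD_eq_getElem?_getD, List.getElem?_set_ne hne]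
  · rfl
termination_by n + 1 - i * j
decreasing_by rw [Nat.mul_succ]; rename_i hc; obtain ⟨hc1, hc2⟩ := hc; omega

theorem sieve_fold_mono (n : Nat) (l : List Nat) : ∀ (s : List Bool) (res : List Nat) (q : Nat),
    q ∈ res → q ∈ (l.foldl (sieveStep n) (s, res)).2 := by
  induction l with
  | nil => intro s res q hq; simpa using hq
  | cons i l ih =>
    intro s res q hq
    simp only [List.foldl_cons]
    by_cases hc : s.getD i false
    · simp only [sieveStep, hc, if_true]
      exact ih _ _ _ (by simp [hq])
    · simp only [sieveStep, hc]
      simp only [Bool.false_eq_true, if_false]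
      exact ih _ _ _ hq

theorem sieve_fold_ge2 (n : Nat) (l : List Nat) : ∀ (s : List Bool) (res : List Nat),
    (∀ x ∈ l, 2 ≤ x) → (∀ q ∈ res, 2 ≤ q) →
    ∀ q ∈ (l.foldl (sieveStep n) (s, res)).2, 2 ≤ q := by
  induction l with
  | nil => intro s res _ hres q hq; exact hres q (by simpa using hq)
  | cons i l ih =>
    intro s res hl hres q hq
    simp only [List.foldl_cons] at hq
    by_cases hc : s.getD i false
    · simp only [sieveStep, hc, if_true] at hq
      refine ih _ _ (fun x hx => hl x (by simp [hx])) ?_ q hq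
      intro r hr
      rcases List.mem_append.mp hr with h | h
      · exact hres r h
      · simp at h; subst h; exact hl r (by simp)
    · simp only [sieveStep, hc, Bool.false_eq_true, if_false] at hq
      exact ih _ _ (fun x hx => hl x (by simp [hx])) hres q hq

theorem sieve_fold_complete (n : Nat) (l : List Nat) : ∀ (s : List Bool) (res : List Nat),
    (∀ m, Nat.Prime m → m ≤ n → s.getD m false = true) →
    ∀ p, Nat.Prime p → p ∈ l → p ≤ n → p ∈ (l.foldl (sieveStep n) (s, res)).2 := by
  induction l with
  | nil => intro s res _ p _ hp; simp at hp
  | cons i l ih =>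
    intro s res hs p hp hpl hpn
    simp only [List.foldl_cons]
    rcases List.mem_cons.mp hpl with he | hmem
    · subst he
      have hc : s.getD p false = true := hs p hp hpn
      simp only [sieveStep, hc, if_true]
      exact sieve_fold_mono n l _ _ p (by simp)
    · by_cases hc : s.getD i false
      · simp only [sieveStep, hc, if_true]
        exact ih _ _ (fun m hm hmn => by rw [crossOff_getD_prime _ _ _ _ _ hm le_rfl]; exact hs m hm hmn) p hp hmem hpn
      · simp only [sieveStep, hc, Bool.false_eq_true, if_false]
        exact ih _ _ hs p hp hmem hpn

theorem primeA_ge2 (L : Nat) : ∀ q ∈ primeA L, 2 ≤ q := by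
  intro q hq
  exact sieve_fold_ge2 L _ _ _ (fun x hx => (List.mem_range'_1.mp hx).1) (by simp) q hq

theorem primeA_complete (L p : Nat) (hp : Nat.Prime p) (hpL : p ≤ L) : p ∈ primeA L := by
  have h2 : 2 ≤ p := hp.two_le
  refine sieve_fold_complete L _ _ _ ?_ p hp ?_ hpL
  · intro m hm hmn
    have h2m : 2 ≤ m := hm.two_le
    rw [List.getD_eq_getElem?_getD, List.getElem?_set_ne (by omega : (1:Nat) ≠ m),
      List.getElem?_set_ne (by omega : (0:Nat) ≠ m), List.getElem?_replicate]
    simp [Nat.lt_succ_of_le hmn]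
  · exact List.mem_range'_1.mpr ⟨h2, by omega⟩

theorem markMul_length (arr : List Bool) (i j n : Nat) : (markMul arr i j n).length = arr.length := by
  rw [markMul]
  split
  · rw [markMul_length]; simp
  · rfl
termination_by n - i * i * j
decreasing_by
  rw [Nat.mul_succ]; rename_i hc; obtain ⟨hc1, hc2⟩ := hc
  have h3 : 2 * 2 ≤ i * i := Nat.mul_le_mul hc1 hc1
  omega

theorem markMul_getD (i n k : Nat) (hi : 2 ≤ i) (hk : k < n) (j : Nat) (arr : List Bool)
    (hlen : arr.length = n) :
    ((markMul arr i j n).getD k false = true ↔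
      (arr.getD k false = true ∨ ∃ t, j ≤ t ∧ k = i * i * t)) := by
  rw [markMul]
  split
  · rename_i h
    rw [markMul_getD i n k hi hk (j + 1) _ (by simp [hlen])]
    by_cases hk' : k = i * i * j
    · refine iff_of_true (Or.inl ?_) (Or.inr ⟨j, le_rfl, hk'⟩)
      subst hk'
      simp [List.getD_eq_getElem?_getD, List.getElem?_set_self (by omega : i * i * j < arr.length)]
    · have hset : (arr.set (i * i * j) true).getD k false = arr.getD k false := by
        simp [List.getD_eq_getElem?_getD, List.getElem?_set_ne (fun he => hk' he.symm)]
      rw [hset]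
      constructor
      · rintro (h1 | ⟨t, ht, he⟩)
        · exact Or.inl h1
        · exact Or.inr ⟨t, by omega, he⟩
      · rintro (h1 | ⟨t, ht, he⟩)
        · exact Or.inl h1
        · refine Or.inr ⟨t, ?_, he⟩
          rcases Nat.eq_or_lt_of_le ht with h1 | h1
          · exact absurd (h1 ▸ he) hk'
          · omega
  · rename_i h
    have hb : ¬ ∃ t, j ≤ t ∧ k = i * i * t := by
      rintro ⟨t, ht, he⟩
      have : i * i * j ≤ i * i * t := Nat.mul_le_mul_left _ ht
      have hn : n ≤ i * i * j := by omega
      omega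
    simp [hb]
termination_by n - i * i * j
decreasing_by
  rw [Nat.mul_succ]; rename_i hc; obtain ⟨hc1, hc2⟩ := hc
  have h3 : 2 * 2 ≤ i * i := Nat.mul_le_mul hc1 hc1
  omega

theorem foldMark_length (n : Nat) (ps : List Nat) : ∀ (arr : List Bool),
    (ps.foldl (fun a p => markMul a p 1 n) arr).length = arr.length := by
  induction ps with
  | nil => intro arr; rfl
  | cons p ps ih => intro arr; simp only [List.foldl_cons]; rw [ih, markMul_length]

theorem foldMark_getD (n k : Nat) (hk : k < n) (ps : List Nat) : ∀ (arr : List Bool),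
    (∀ p ∈ ps, 2 ≤ p) → arr.length = n →
    ((ps.foldl (fun a p => markMul a p 1 n) arr).getD k false = true ↔
      (arr.getD k false = true ∨ ∃ p ∈ ps, ∃ t, 1 ≤ t ∧ k = p * p * t)) := by
  induction ps with
  | nil => intro arr _ _; simp
  | cons p ps ih =>
    intro arr hps hlen
    simp only [List.foldl_cons]
    rw [ih _ (fun q hq => hps q (by simp [hq])) (by rw [markMul_length, hlen]),
      markMul_getD p n k (hps p (by simp)) hk 1 arr hlen]
    constructor
    · rintro ((h1 | ⟨t, ht, he⟩) | ⟨q, hq, t, ht, he⟩)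
      · exact Or.inl h1
      · exact Or.inr ⟨p, by simp, t, ht, he⟩
      · exact Or.inr ⟨q, by simp [hq], t, ht, he⟩
    · rintro (h1 | ⟨q, hq, t, ht, he⟩)
      · exact Or.inl (Or.inl h1)
      · rcases List.mem_cons.mp hq with h2 | h2
        · exact Or.inl (Or.inr ⟨t, ht, h2 ▸ he⟩)
        · exact Or.inr ⟨q, h2, t, ht, he⟩

theorem markFrom_length (arr : List Bool) (m s n : Nat) : (markFrom arr m s n).length = arr.length := by
  rw [markFrom]
  split
  · rw [markFrom_length]; simp
  · rfl
termination_by n - m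
decreasing_by rename_i hc; obtain ⟨hc1, hc2⟩ := hc; omega

theorem markFrom_getD (s n k : Nat) (hs : 1 ≤ s) (hk : k < n) (m : Nat) (arr : List Bool)
    (hlen : arr.length = n) :
    ((markFrom arr m s n).getD k false = true ↔
      (arr.getD k false = true ∨ ∃ t, k = m + s * t)) := by
  rw [markFrom]
  split
  · rename_i h
    rw [markFrom_getD s n k hs hk (m + s) _ (by simp [hlen])]
    by_cases hk' : k = m
    · refine iff_of_true (Or.inl ?_) (Or.inr ⟨0, by omega⟩)
      subst hk'
      simp [List.getD_eq_getElem?_getD, List.getElem?_set_self (by omega : k < arr.length)]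
    · have hset : (arr.set m true).getD k false = arr.getD k false := by
        simp [List.getD_eq_getElem?_getD, List.getElem?_set_ne (fun he => hk' he.symm)]
      rw [hset]
      constructor
      · rintro (h1 | ⟨t, he⟩)
        · exact Or.inl h1
        · exact Or.inr ⟨t + 1, by rw [Nat.mul_succ] at *; omega⟩
      · rintro (h1 | ⟨t, he⟩)
        · exact Or.inl h1
        · rcases t with _ | t
          · exact absurd (by omega : k = m) hk'
          · exact Or.inr ⟨t, by rw [Nat.mul_succ] at he; omega⟩
  · rename_i h
    have hb : ¬ ∃ t, k = m + s * t := by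
      rintro ⟨t, he⟩
      omega
    simp [hb]
termination_by n - m
decreasing_by rename_i hc; obtain ⟨hc1, hc2⟩ := hc; omega

theorem outerB_getD (n k : Nat) (hk : k < n) (i : Nat) (hi : 2 ≤ i) : ∀ (arr : List Bool),
    arr.length = n →
    ((outerB arr i n).getD k false = true ↔
      (arr.getD k false = true ∨ ∃ q, i ≤ q ∧ ∃ t, 1 ≤ t ∧ k = q * q * t)) := by
  intro arr hlen
  rw [outerB]
  split
  · rename_i h
    rw [outerB_getD n k hk (i + 1) (by omega) _ (by rw [markFrom_length, hlen])]
    have hmf := markFrom_getD (i * i) n k (by nlinarith [h.1]) hk (i * i) arr hlen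
    rw [hmf]
    constructor
    · rintro ((h1 | ⟨t, he⟩) | ⟨q, hq, t, ht, he⟩)
      · exact Or.inl h1
      · exact Or.inr ⟨i, le_rfl, t + 1, by omega, by rw [Nat.mul_add, Nat.mul_one]; omega⟩
      · exact Or.inr ⟨q, by omega, t, ht, he⟩
    · rintro (h1 | ⟨q, hq, t, ht, he⟩)
      · exact Or.inl (Or.inl h1)
      · rcases Nat.eq_or_lt_of_le hq with h2 | h2
        · subst h2
          rcases t with _ | t
          · omega
          · exact Or.inl (Or.inr ⟨t, by rw [Nat.mul_succ] at he; omega⟩)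
        · exact Or.inr ⟨q, by omega, t, ht, he⟩
  · rename_i h
    have hb : ¬ ∃ q, i ≤ q ∧ ∃ t, 1 ≤ t ∧ k = q * q * t := by
      rintro ⟨q, hq, t, ht, he⟩
      have h1 : i * i ≤ q * q := Nat.mul_le_mul hq hq
      have h2 : q * q * 1 ≤ q * q * t := Nat.mul_le_mul_left _ ht
      have h3 : n ≤ i * i := by omega
      omega
    simp [hb]
termination_by n - i
decreasing_by
  rename_i hc; obtain ⟨hc1, hc2⟩ := hc
  have h3 : i ≤ i * i := Nat.le_mul_of_pos_left i (by omega)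
  omega

-- litmitOf n squares to at least n
theorem litmitOf_sq (n : Nat) : n ≤ litmitOf n * litmitOf n := by
  unfold litmitOf
  split
  · omega
  · exact le_of_lt (by simpa [Nat.succ_eq_add_one] using Nat.lt_succ_sqrt n)

-- the marked sets agree: a multiple of a prime square below n iff a multiple of any square i², i ≥ 2
theorem key_iff (n k : Nat) (hk : k < n) :
    (∃ p ∈ primeA (litmitOf n), ∃ t, 1 ≤ t ∧ k = p * p * t) ↔
      (∃ q, 2 ≤ q ∧ ∃ t, 1 ≤ t ∧ k = q * q * t) := by
  constructor
  · rintro ⟨p, hp, t, ht, he⟩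
    exact ⟨p, primeA_ge2 _ p hp, t, ht, he⟩
  · rintro ⟨q, hq, t, ht, he⟩
    set p := q.minFac with hpdef
    have hp : Nat.Prime p := Nat.minFac_prime (by omega)
    have hdvd : p * p ∣ k := by
      have h1 : p ∣ q := Nat.minFac_dvd q
      exact he ▸ Dvd.dvd.mul_right (mul_dvd_mul h1 h1) t
    have hkpos : 0 < k := by
      have : 2 * 2 * 1 ≤ q * q * t := Nat.mul_le_mul (Nat.mul_le_mul hq hq) ht
      omega
    have hle : p * p ≤ k := Nat.le_of_dvd hkpos hdvd
    have hpL : p ≤ litmitOf n := by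
      by_contra hc
      rw [not_le] at hc
      have : litmitOf n * litmitOf n < p * p :=
        Nat.mul_lt_mul_of_lt_of_le hc (le_of_lt hc) (by omega)
      have := litmitOf_sq n
      omega
    refine ⟨p, primeA_complete _ p hp hpL, k / (p * p), ?_, (Nat.mul_div_cancel' hdvd).symm⟩
    have hpp : 0 < p * p := by have := hp.two_le; positivity
    exact (Nat.one_le_div_iff hpp).mpr hle

-- A's final scan as a filter
theorem scanA_eq (arr : List Bool) :
    (List.range arr.length).foldl
      (fun res i => if arr.getD i false then res ++ [Int.ofNat i] else res) []
    = ((List.range arr.length).filter (fun i => arr.getD i false)).map Int.ofNat := by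
  exact PySem.List.foldl_append_if (fun i => arr.getD i false) Int.ofNat _ []

theorem strongNumber_eq_alt (N : Int) : strongNumber N = strongNumber_alt N := by
  unfold strongNumber strongNumber_alt
  split
  · rfl
  · rename_i hN
    have h4 : 4 ≤ N.toNat := by omega
    rw [scanA_eq, foldMark_length, List.length_replicate]
    refine congrArg (List.map Int.ofNat) (List.filter_congr ?_)
    intro k hkmem
    have hk : k < N.toNat := List.mem_range.mp hkmem
    have hA := foldMark_getD N.toNat k hk (primeA (litmitOf N.toNat)) (List.replicate N.toNat false)
      (primeA_ge2 _) (by simp)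
    have hB := outerB_getD N.toNat k hk 2 le_rfl (List.replicate N.toNat false) (by simp)
    have hrep : (List.replicate N.toNat false).getD k false = false := by
      simp [List.getD_eq_getElem?_getD, hk]
    rw [hrep] at hA hB
    simp only [Bool.false_eq_true, false_or] at hA hB
    apply Bool.eq_iff_iff.mpr
    rw [hA, hB]
    exact key_iff N.toNat k hk

-- ===== VERDICT (by name: the statement is the Claim_ definition above) =====
theorem strongNumber_spec : Claim_equal_strongNumber := by
  intro N _
  unfold Spec_strongNumber
  exact strongNumber_eq_alt N
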